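-- pv_equiv track=rewrite | github.com/acee28/dex.py | students.py | students_passing_all
-- ===== SOURCE A (Python) =====
-- def students_passing_all(data, passing_score=60):
--     """
--     Returns:
--       - set of names who passed all subjects
--       - dict of pass counts per subject
--     """
--     passed_all = set()
--     pass_counts = {"math": 0, "english": 0, "science": 0}
--
--     for name, age, m, e, s in data:
--         if m >= passing_score:
--             pass_counts["math"] += 1
--         if e >= passing_score:
--             pass_counts["english"] += 1
--         if s >= passing_score:
--             pass_counts["science"] += 1
--
--         if m >= passing_score and e >= passing_score and s >= passing_score:
--             passed_all.add(name)
--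
--     return passed_all, pass_counts
-- ===== SOURCE B (Python) =====
-- def students_passing_all(data, passing_score=60):
--     rows = list(data)
--     pass_counts = {
--         "math": sum(1 for _n, _a, m, _e, _s in rows if m >= passing_score),
--         "english": sum(1 for _n, _a, _m, e, _s in rows if e >= passing_score),
--         "science": sum(1 for _n, _a, _m, _e, s in rows if s >= passing_score),
--     }
--     passed_all = {n for n, _a, m, e, s in rows
--                   if m >= passing_score and e >= passing_score and s >= passing_score}
--     return passed_all, pass_counts
-- ===== Notes on version B (the rewrite author's own statement) =====
-- stated objective: idiomatic
-- what changed: Replaces A's single loop maintaining a mutable set and counter dict with four independent aggregate comprehensions (one countP-style sum per subject and one set comprehension for the names), each scanning the materialized rows separately.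
import Mathlib
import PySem

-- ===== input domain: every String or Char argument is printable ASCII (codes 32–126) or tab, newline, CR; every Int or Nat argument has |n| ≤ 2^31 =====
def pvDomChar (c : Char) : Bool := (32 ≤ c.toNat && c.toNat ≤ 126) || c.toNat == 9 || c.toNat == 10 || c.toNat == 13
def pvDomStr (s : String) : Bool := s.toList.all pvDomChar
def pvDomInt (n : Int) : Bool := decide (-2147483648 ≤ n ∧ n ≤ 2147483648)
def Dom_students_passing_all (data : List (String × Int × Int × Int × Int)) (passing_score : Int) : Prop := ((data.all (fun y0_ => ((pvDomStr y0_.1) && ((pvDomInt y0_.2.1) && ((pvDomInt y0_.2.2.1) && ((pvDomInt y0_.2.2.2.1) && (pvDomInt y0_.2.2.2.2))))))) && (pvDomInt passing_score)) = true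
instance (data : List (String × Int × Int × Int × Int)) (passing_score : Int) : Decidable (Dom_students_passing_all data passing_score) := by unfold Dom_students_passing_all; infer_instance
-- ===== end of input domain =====

-- B replaces A's single loop maintaining a set and a counter dict by four independent
-- aggregate passes (one count per subject, one set comprehension); idiomatic, same cost.

-- ===== PORT A =====
-- one iteration of A's for-loop: update pass_counts (math, english, science), then passed_all
def spaStep (passing_score : Int)
    (st : PySem.Set String × PySem.Dict String Int)
    (r : String × Int × Int × Int × Int) : PySem.Set String × PySem.Dict String Int :=
  let pa := st.1
  let pc := st.2
  let pc := if passing_score ≤ r.2.2.1 then pc.modify "math" 0 (· + 1) else pc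
  let pc := if passing_score ≤ r.2.2.2.1 then pc.modify "english" 0 (· + 1) else pc
  let pc := if passing_score ≤ r.2.2.2.2 then pc.modify "science" 0 (· + 1) else pc
  let pa := if passing_score ≤ r.2.2.1 ∧ passing_score ≤ r.2.2.2.1 ∧ passing_score ≤ r.2.2.2.2
            then pa.add r.1 else pa
  (pa, pc)

def students_passing_all (data : List (String × Int × Int × Int × Int)) (passing_score : Int) : List String × (List (String × Int)) :=
  let init : PySem.Set String × PySem.Dict String Int :=
    (PySem.Set.empty, PySem.Dict.ofList [("math", 0), ("english", 0), ("science", 0)])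
  let res := data.foldl (spaStep passing_score) init
  (res.1, res.2.items)

-- ===== PORT B =====
def students_passing_all_alt (data : List (String × Int × Int × Int × Int)) (passing_score : Int) : List String × (List (String × Int)) :=
  let rows := data
  let pass_counts : List (String × Int) :=
    [("math", (rows.countP (fun r => decide (passing_score ≤ r.2.2.1)) : Int)),
     ("english", (rows.countP (fun r => decide (passing_score ≤ r.2.2.2.1)) : Int)),
     ("science", (rows.countP (fun r => decide (passing_score ≤ r.2.2.2.2)) : Int))]
  let passed_all : PySem.Set String :=
    PySem.Set.ofList (rows.filterMap (fun r =>
      if passing_score ≤ r.2.2.1 ∧ passing_score ≤ r.2.2.2.1 ∧ passing_score ≤ r.2.2.2.2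
      then some r.1 else none))
  (passed_all, pass_counts)

-- ===== PRECONDITION & SPEC =====
def Spec_students_passing_all (data : List (String × Int × Int × Int × Int)) (passing_score : Int) (out : List String × (List (String × Int))) : Prop := out = students_passing_all_alt data passing_score
instance (data : List (String × Int × Int × Int × Int)) (passing_score : Int) (out : List String × (List (String × Int))) : Decidable (Spec_students_passing_all data passing_score out) := by unfold Spec_students_passing_all; infer_instance

-- ===== CLAIM (what is proved, stated in full; the proofs are below) =====
def Claim_equal_students_passing_all : Prop := ∀ (data : List (String × Int × Int × Int × Int)) (passing_score : Int), Dom_students_passing_all data passing_score → Spec_students_passing_all data passing_score (students_passing_all data passing_score)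

-- ===== LEMMAS AND PROOFS =====
-- the shape A's pass_counts dict keeps throughout the loop
def spaDict3 (a b c : Int) : PySem.Dict String Int :=
  PySem.Dict.mk [("math", a), ("english", b), ("science", c)]

lemma spaDict3_math (a b c : Int) : (spaDict3 a b c).modify "math" 0 (· + 1) = spaDict3 (a + 1) b c := rfl
lemma spaDict3_english (a b c : Int) : (spaDict3 a b c).modify "english" 0 (· + 1) = spaDict3 a (b + 1) c := rfl
lemma spaDict3_science (a b c : Int) : (spaDict3 a b c).modify "science" 0 (· + 1) = spaDict3 a b (c + 1) := rfl

-- loop invariant: A's fold from any accumulator equals B's aggregates added on top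
lemma spaLoop_eq (passing_score : Int) (l : List (String × Int × Int × Int × Int))
    (pa : PySem.Set String) (a b c : Int) :
    l.foldl (spaStep passing_score) (pa, spaDict3 a b c) =
      (PySem.Set.update pa (l.filterMap (fun r =>
          if passing_score ≤ r.2.2.1 ∧ passing_score ≤ r.2.2.2.1 ∧ passing_score ≤ r.2.2.2.2
          then some r.1 else none)),
       spaDict3 (a + (l.countP (fun r => decide (passing_score ≤ r.2.2.1)) : Int))
                (b + (l.countP (fun r => decide (passing_score ≤ r.2.2.2.1)) : Int))
                (c + (l.countP (fun r => decide (passing_score ≤ r.2.2.2.2)) : Int))) := by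
  induction l generalizing pa a b c with
  | nil => simp [PySem.Set.update]
  | cons r tl ih =>
    simp only [List.foldl_cons, List.filterMap_cons, List.countP_cons, spaStep]
    by_cases h1 : passing_score ≤ r.2.2.1 <;>
    by_cases h2 : passing_score ≤ r.2.2.2.1 <;>
    by_cases h3 : passing_score ≤ r.2.2.2.2 <;>
    simp only [h1, h2, h3, if_false, and_self, and_true, and_false, if_pos,
      decide_true, decide_false,
      spaDict3_math, spaDict3_english, spaDict3_science, ih] <;>
    refine Prod.ext ?_ ?_ <;>
    simp [PySem.Set.update] <;> (congr 1 <;> first | ring | (push_cast; ring))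

-- ===== VERDICT (by name: the statement is the Claim_ definition above) =====
theorem students_passing_all_spec : Claim_equal_students_passing_all := by
  intro data passing_score _
  show students_passing_all data passing_score = students_passing_all_alt data passing_score
  simp only [students_passing_all, students_passing_all_alt]
  rw [show PySem.Dict.ofList [("math", (0:Int)), ("english", 0), ("science", 0)] = spaDict3 0 0 0 from rfl,
      spaLoop_eq]
  simp [spaDict3, PySem.Set.ofList_eq_foldl, PySem.Set.update, PySem.Set.empty]
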